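-- pv_equiv track=rewrite | github.com/chengyitang/interview-algo-practices | meta-intern-oa/meta.py | lampIlluminated
-- ===== SOURCE A (Python) =====
-- def lampIlluminated(lamps, benches):
--     # 0 -> on
--     # 1 -> bench
--     # 2 -> off
--     ''' Sweep algo '''
--
--     events = []
--
--     for lamp in lamps:
--         events.append([0 ,lamp[0]]) # on
--         events.append([2, lamp[1] + 1]) # off
--
--     for bench in benches:
--         events.append([1, bench])
--
--     events.sort(key=lambda x: x[1]) # sort by axis
--
--     # Track events
--     answer = []
--     lampsOn = 0
--     for type, axis in events:
--         if type == 0: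
--             lampsOn += 1
--         elif type == 2:
--             lampsOn -= 1
--         else:
--             answer.append(lampsOn)
--     return answer
-- ===== SOURCE B (Python) =====
-- def lampIlluminated(lamps, benches):
--     # For each bench (in axis order), count lamps already switched on at b
--     # minus lamps already switched off before b: no event list, no sweep state.
--     return [sum((s <= b) - (e < b) for s, e in lamps) for b in sorted(benches)]
-- ===== Notes on version B (the rewrite author's own statement) =====
-- stated objective: simpler
-- what changed: Replaces the event-list construction, sort of 2n+m events and stateful sweep with a one-line direct count per sorted bench: lamps with start <= b minus lamps with end < b.
import Mathlib
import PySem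

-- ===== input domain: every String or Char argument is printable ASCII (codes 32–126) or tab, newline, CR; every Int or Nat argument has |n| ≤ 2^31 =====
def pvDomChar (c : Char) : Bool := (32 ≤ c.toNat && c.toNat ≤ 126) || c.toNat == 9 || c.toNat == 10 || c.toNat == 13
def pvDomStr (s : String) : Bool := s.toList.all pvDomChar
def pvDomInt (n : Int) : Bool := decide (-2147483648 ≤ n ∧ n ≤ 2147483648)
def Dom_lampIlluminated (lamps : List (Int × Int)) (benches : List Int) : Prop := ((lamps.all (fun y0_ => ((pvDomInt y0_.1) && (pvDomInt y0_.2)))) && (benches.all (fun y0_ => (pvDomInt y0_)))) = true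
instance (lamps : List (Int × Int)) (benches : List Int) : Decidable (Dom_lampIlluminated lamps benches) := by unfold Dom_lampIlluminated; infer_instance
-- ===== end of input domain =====

-- B replaces A's event list + sort + stateful sweep by a direct count per sorted bench
-- (lamps turned on at or before b minus lamps turned off before b): simpler, no event bookkeeping.

-- ===== PORT A =====
def lampIlluminated (lamps : List (Int × Int)) (benches : List Int) : List Int :=
  let events := lamps.foldl (fun acc lamp => acc ++ [((0 : Int), lamp.1), ((2 : Int), lamp.2 + 1)]) []
  let events := benches.foldl (fun acc bench => acc ++ [((1 : Int), bench)]) events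
  let events := PySem.List.sorted events (fun x => x.2)
  (events.foldl (fun (st : List Int × Int) e =>
      if e.1 = 0 then (st.1, st.2 + 1)
      else if e.1 = 2 then (st.1, st.2 - 1)
      else (st.1 ++ [st.2], st.2)) ([], 0)).1

-- ===== PORT B =====
def lampIlluminated_alt (lamps : List (Int × Int)) (benches : List Int) : List Int :=
  (PySem.List.sorted benches (fun b => b)).map (fun b =>
    lamps.foldl (fun acc l => acc + ((if l.1 ≤ b then (1 : Int) else 0) - (if l.2 < b then (1 : Int) else 0))) 0)

-- ===== PRECONDITION & SPEC =====
def Spec_lampIlluminated (lamps : List (Int × Int)) (benches : List Int) (out : List Int) : Prop := out = lampIlluminated_alt lamps benches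
instance (lamps : List (Int × Int)) (benches : List Int) (out : List Int) : Decidable (Spec_lampIlluminated lamps benches out) := by unfold Spec_lampIlluminated; infer_instance

-- ===== CLAIM (what is proved, stated in full; the proofs are below) =====
def Claim_equal_lampIlluminated : Prop := ∀ (lamps : List (Int × Int)) (benches : List Int), Dom_lampIlluminated lamps benches → Spec_lampIlluminated lamps benches (lampIlluminated lamps benches)

-- ===== LEMMAS AND PROOFS =====

/-- A's sweep loop, on the answer-list/lamps-on state, as a structural recursion. -/
def pvSweep : List (Int × Int) → Int → List Int
  | [], _ => []
  | e :: t, n =>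
    if e.1 = 0 then pvSweep t (n + 1)
    else if e.1 = 2 then pvSweep t (n - 1)
    else n :: pvSweep t n

def pvIsBench (e : Int × Int) : Bool := decide (e.1 ≠ 0 ∧ e.1 ≠ 2)

/-- Contribution of one event to the lamps-on counter at axis ≤ b. -/
def pvTerm (b : Int) (e : Int × Int) : Int :=
  if e.2 ≤ b then (if e.1 = 0 then 1 else if e.1 = 2 then -1 else 0) else 0

def pvDelta (es : List (Int × Int)) (b : Int) : Int := (es.map (pvTerm b)).sum

/-- Tie order a stable sort guarantees here: a bench event is never followed by a
    lamp event with the same axis. -/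
def pvQ (e1 e2 : Int × Int) : Prop := (e1.1 ≠ 0 ∧ e1.1 ≠ 2) → (e2.1 = 0 ∨ e2.1 = 2) → e1.2 < e2.2

lemma pv_foldl_sweep (es : List (Int × Int)) (ans : List Int) (n : Int) :
    (es.foldl (fun (st : List Int × Int) e =>
      if e.1 = 0 then (st.1, st.2 + 1)
      else if e.1 = 2 then (st.1, st.2 - 1)
      else (st.1 ++ [st.2], st.2)) (ans, n)).1 = ans ++ pvSweep es n := by
  induction es generalizing ans n with
  | nil => simp [pvSweep]
  | cons e t ih =>
    by_cases h0 : e.1 = 0 <;> by_cases h2 : e.1 = 2 <;>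
      simp [pvSweep, h0, h2, ih]

lemma pv_sweep_eq : ∀ (es : List (Int × Int)) (n : Int),
    es.Pairwise (fun a b => a.2 ≤ b.2) → es.Pairwise pvQ →
    pvSweep es n = (es.filter pvIsBench).map (fun e => n + pvDelta es e.2) := by
  intro es
  induction es with
  | nil => intro n _ _; simp [pvSweep, pvDelta]
  | cons e t ih =>
    intro n h1 hQ
    rw [List.pairwise_cons] at h1 hQ
    obtain ⟨he1, ht1⟩ := h1
    obtain ⟨heQ, htQ⟩ := hQ
    by_cases h0 : e.1 = 0
    · have hnb : pvIsBench e = false := by simp [pvIsBench, h0]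
      simp only [pvSweep, h0, List.filter_cons, hnb, Bool.false_eq_true, if_false]
      rw [ih (n + 1) ht1 htQ]
      apply List.map_congr_left
      intro x hx
      have hxt : x ∈ t := List.mem_of_mem_filter hx
      have : pvTerm x.2 e = 1 := by simp [pvTerm, h0, he1 x hxt]
      simp only [pvDelta, List.map_cons, List.sum_cons, this]
      omega
    · by_cases h2 : e.1 = 2
      · have hnb : pvIsBench e = false := by simp [pvIsBench, h2]
        simp only [pvSweep, if_false, h2, List.filter_cons, hnb,
          Bool.false_eq_true]
        rw [ih (n - 1) ht1 htQ]
        apply List.map_congr_left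
        intro x hx
        have hxt : x ∈ t := List.mem_of_mem_filter hx
        have : pvTerm x.2 e = -1 := by simp [pvTerm, h2, he1 x hxt]
        simp only [pvDelta, List.map_cons, List.sum_cons, this]
        omega
      · have hb : pvIsBench e = true := by simp [pvIsBench, h0, h2]
        have hterm : ∀ b, pvTerm b e = 0 := by intro b; simp [pvTerm, h0, h2]
        simp only [pvSweep, h0, if_false, h2, List.filter_cons, hb, if_true, List.map_cons]
        rw [List.cons_eq_cons]
        constructor
        · -- head: lamps on when this bench is processed = n (no lamp event ≤ e.2 remains)
          have hz0 : (List.map (pvTerm e.2) t).sum = 0 := by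
            apply List.sum_eq_zero
            intro x hx
            simp only [List.mem_map] at hx
            obtain ⟨y, hy, rfl⟩ := hx
            by_cases hy0 : y.1 = 0
            · have := heQ y hy ⟨h0, h2⟩ (Or.inl hy0)
              simp [pvTerm, not_le.mpr this]
            · by_cases hy2 : y.1 = 2
              · have := heQ y hy ⟨h0, h2⟩ (Or.inr hy2)
                simp [pvTerm, not_le.mpr this]
              · simp [pvTerm, hy0, hy2]
          simp [pvDelta, hterm, hz0]
        · rw [ih n ht1 htQ]
          apply List.map_congr_left
          intro x _
          simp [pvDelta, hterm]

lemma pv_insert_Q (x : Int × Int) (hx : x.1 ≠ 0 ∧ x.1 ≠ 2) :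
    ∀ acc : List (Int × Int), acc.Pairwise (fun a b => a.2 ≤ b.2) → acc.Pairwise pvQ →
    (PySem.List.insertBy (fun a b => decide (a.2 < b.2)) x acc).Pairwise pvQ := by
  intro acc
  induction acc with
  | nil => intro _ _; simp [PySem.List.insertBy, pvQ]
  | cons y t ih =>
    intro h1 hQ
    rw [List.pairwise_cons] at h1 hQ
    obtain ⟨he1, ht1⟩ := h1
    obtain ⟨heQ, htQ⟩ := hQ
    by_cases hcmp : x.2 < y.2
    · have hstep : PySem.List.insertBy (fun a b => decide (a.2 < b.2)) x (y :: t) = x :: y :: t := by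
        simp [PySem.List.insertBy, hcmp]
      rw [hstep, List.pairwise_cons]
      refine ⟨?_, List.Pairwise.cons heQ htQ⟩
      intro z hz _ _
      rcases List.mem_cons.mp hz with rfl | hzt
      · exact hcmp
      · exact lt_of_lt_of_le hcmp (he1 z hzt)
    · have hstep : PySem.List.insertBy (fun a b => decide (a.2 < b.2)) x (y :: t)
          = y :: PySem.List.insertBy (fun a b => decide (a.2 < b.2)) x t := by
        simp [PySem.List.insertBy, hcmp]
      rw [hstep, List.pairwise_cons]
      refine ⟨?_, ih ht1 htQ⟩
      intro z hz hyb hzl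
      rcases (PySem.List.mem_insertBy _ x z t).mp hz with rfl | hzt
      · rcases hzl with h | h
        · exact absurd h hx.1
        · exact absurd h hx.2
      · exact heQ z hzt hyb hzl

lemma pv_foldl_insert_Q :
    ∀ (bs : List (Int × Int)), (∀ x ∈ bs, x.1 ≠ 0 ∧ x.1 ≠ 2) →
    ∀ zs : List (Int × Int), (PySem.List.sorted zs (fun e => e.2)).Pairwise pvQ →
    (bs.foldl (fun acc x => PySem.List.insertBy (fun a b => decide (a.2 < b.2)) x acc)
        (PySem.List.sorted zs (fun e => e.2))).Pairwise pvQ := by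
  intro bs
  induction bs with
  | nil => intro _ zs h; simpa using h
  | cons x t ih =>
    intro hb zs hz
    have hins : PySem.List.insertBy (fun a b => decide (a.2 < b.2)) x
        (PySem.List.sorted zs (fun e => e.2)) = PySem.List.sorted (zs ++ [x]) (fun e => e.2) := by
      rw [PySem.List.sorted_eq_foldl_insertBy (zs ++ [x]) (fun e => e.2), List.foldl_append,
        ← PySem.List.sorted_eq_foldl_insertBy zs (fun e => e.2)]
      simp
    simp only [List.foldl_cons, hins]
    apply ih (fun y hy => hb y (List.mem_cons_of_mem _ hy))
    rw [← hins]
    exact pv_insert_Q x (hb x List.mem_cons_self) _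
      (PySem.List.sorted_pairwise zs (fun e => e.2)) hz

lemma pv_delta_flatMap (lamps : List (Int × Int)) (b : Int) :
    pvDelta (lamps.flatMap (fun l => [((0 : Int), l.1), ((2 : Int), l.2 + 1)])) b
      = (lamps.map (fun l => (if l.1 ≤ b then (1 : Int) else 0) - (if l.2 < b then (1 : Int) else 0))).sum := by
  induction lamps with
  | nil => simp [pvDelta]
  | cons l t ih =>
    simp only [pvDelta] at ih
    simp only [List.flatMap_cons, pvDelta, List.map_append, List.sum_append, List.map_cons,
      List.sum_cons, List.map_nil, List.sum_nil]
    rw [ih]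
    simp only [pvTerm]
    split_ifs <;> omega

lemma pv_delta_perm {es fs : List (Int × Int)} (h : es.Perm fs) (b : Int) :
    pvDelta es b = pvDelta fs b := (h.map (pvTerm b)).sum_eq

theorem lampIlluminated_spec_core (lamps : List (Int × Int)) (benches : List Int) :
    lampIlluminated lamps benches = lampIlluminated_alt lamps benches := by
  simp only [lampIlluminated, PySem.List.foldl_append_eq_flatMap, List.nil_append]
  have hbmconv : List.flatMap (fun x => [((1 : Int), x)]) benches
      = benches.map (fun b => ((1 : Int), b)) := by
    induction benches with
    | nil => simp
    | cons b t ih => simp [ih]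
  rw [hbmconv]
  set ev1 : List (Int × Int) := lamps.flatMap (fun l => [((0 : Int), l.1), ((2 : Int), l.2 + 1)]) with hev1
  set bm : List (Int × Int) := benches.map (fun b => ((1 : Int), b)) with hbm
  set S : List (Int × Int) := PySem.List.sorted (ev1 ++ bm) (fun x => x.2) with hS
  -- all events in ev1 are lamp events
  have hev1lamp : ∀ e ∈ ev1, e.1 = 0 ∨ e.1 = 2 := by
    intro e he
    rw [hev1, List.mem_flatMap] at he
    obtain ⟨l, _, he⟩ := he
    simp only [List.mem_cons, List.not_mem_nil, or_false] at he
    rcases he with rfl | rfl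
    · exact Or.inl rfl
    · exact Or.inr rfl
  -- the sorted event list respects the stable tie order pvQ
  have hQ : S.Pairwise pvQ := by
    rw [hS, PySem.List.sorted_eq_foldl_insertBy (ev1 ++ bm) (fun x => x.2), List.foldl_append,
      ← PySem.List.sorted_eq_foldl_insertBy ev1 (fun x => x.2)]
    apply pv_foldl_insert_Q
    · intro x hx
      rw [hbm, List.mem_map] at hx
      obtain ⟨b, _, rfl⟩ := hx
      constructor <;> simp
    · apply List.pairwise_of_forall_mem_list
      intro x hx y _
      intro hxb _
      have := hev1lamp x ((PySem.List.mem_sorted ev1 (fun x => x.2) false x).mp hx)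
      rcases this with h | h
      · exact absurd h hxb.1
      · exact absurd h hxb.2
  have h1 : S.Pairwise (fun a b => a.2 ≤ b.2) := PySem.List.sorted_pairwise _ _
  rw [pv_foldl_sweep, List.nil_append, pv_sweep_eq S 0 h1 hQ]
  -- the bench events of S, read off by axis, are the sorted benches
  have horder : (S.filter pvIsBench).map (fun e => e.2) = PySem.List.sorted benches (fun b => b) := by
    symm
    apply PySem.List.sorted_id_eq_of_perm_of_pairwise
    · have hperm : (S.filter pvIsBench).Perm ((ev1 ++ bm).filter pvIsBench) :=
        (PySem.List.sorted_perm (ev1 ++ bm) (fun x => x.2) false).filter pvIsBench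
      have hfil : (ev1 ++ bm).filter pvIsBench = bm := by
        rw [List.filter_append]
        have h1' : ev1.filter pvIsBench = [] := by
          rw [List.filter_eq_nil_iff]
          intro e he
          rcases hev1lamp e he with h | h <;> simp [pvIsBench, h]
        have h2' : bm.filter pvIsBench = bm := by
          rw [List.filter_eq_self]
          intro e he
          rw [hbm, List.mem_map] at he
          obtain ⟨b, _, rfl⟩ := he
          simp [pvIsBench]
        rw [h1', h2', List.nil_append]
      have : ((S.filter pvIsBench).map (fun e => e.2)).Perm (bm.map (fun e => e.2)) :=
        (hperm.trans (by rw [hfil])).map _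
      refine this.trans ?_
      rw [hbm, List.map_map]
      simp
    · have hsub : List.Pairwise (fun a b : Int × Int => a.2 ≤ b.2) (S.filter pvIsBench) :=
        h1.sublist List.filter_sublist
      exact List.Pairwise.map (fun e : Int × Int => e.2) (fun a b h => h) hsub
  have hcomp : List.map (fun e => 0 + pvDelta S e.2) (List.filter pvIsBench S)
      = List.map (fun b => 0 + pvDelta S b) (List.map (fun e => e.2) (List.filter pvIsBench S)) := by
    rw [List.map_map]
    rfl
  rw [hcomp, horder]
  unfold lampIlluminated_alt
  apply List.map_congr_left
  intro b _
  rw [PySem.List.foldl_add, pv_delta_perm (PySem.List.sorted_perm (ev1 ++ bm) (fun x => x.2) false) b]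
  have hsplit : pvDelta (ev1 ++ bm) b = pvDelta ev1 b + pvDelta bm b := by
    simp [pvDelta]
  have hbm0 : pvDelta bm b = 0 := by
    apply List.sum_eq_zero
    intro x hx
    simp only [List.mem_map] at hx
    obtain ⟨y, hy, rfl⟩ := hx
    rw [hbm, List.mem_map] at hy
    obtain ⟨c, _, rfl⟩ := hy
    simp [pvTerm]
  rw [hsplit, hbm0, hev1, pv_delta_flatMap]
  omega

-- ===== VERDICT (by name: the statement is the Claim_ definition above) =====
theorem lampIlluminated_spec : Claim_equal_lampIlluminated := by
  intro lamps benches _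
  unfold Spec_lampIlluminated
  exact lampIlluminated_spec_core lamps benches
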